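-- pv_equiv track=rewrite | github.com/easierdata/geohash-cid | geohashtree/filesystem.py | combine_tuples
-- ===== SOURCE A (Python) =====
-- def combine_tuples(tuples):
--     combined = []  # Initialize an empty list to hold the combined tuples
--     for offset, length in tuples:
--         if combined and combined[-1][0] + combined[-1][1] == offset:
--             # If the current tuple can be combined with the last one in the combined list,
--             # update the last tuple's length to include the current tuple's length
--             combined[-1] = (combined[-1][0], combined[-1][1] + length)
--         else:
--             # If the current tuple cannot be combined with the last one, add it as a new tuple
--             combined.append((offset, length))
--     return combined
-- ===== SOURCE B (Python) =====
-- def combine_tuples(tuples):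
--     # Phase 1: split the input into maximal contiguous runs, tracking the
--     # running end of the current run instead of re-reading the output list.
--     runs = []
--     prev_end = None
--     for offset, length in tuples:
--         if offset == prev_end:
--             runs[-1].append((offset, length))
--         else:
--             runs.append([(offset, length)])
--         prev_end = offset + length
--     # Phase 2: emit one merged tuple per run.
--     return [(run[0][0], sum(l for _, l in run)) for run in runs]
-- ===== Notes on version B (the rewrite author's own statement) =====
-- stated objective: alternative
-- what changed: Replaced A's scan that extends the last tuple of the result in place with a two-phase decomposition: first split the input into maximal contiguous runs while tracking the running end, then emit one (first_offset, sum_of_lengths) tuple per run.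
import Mathlib
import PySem

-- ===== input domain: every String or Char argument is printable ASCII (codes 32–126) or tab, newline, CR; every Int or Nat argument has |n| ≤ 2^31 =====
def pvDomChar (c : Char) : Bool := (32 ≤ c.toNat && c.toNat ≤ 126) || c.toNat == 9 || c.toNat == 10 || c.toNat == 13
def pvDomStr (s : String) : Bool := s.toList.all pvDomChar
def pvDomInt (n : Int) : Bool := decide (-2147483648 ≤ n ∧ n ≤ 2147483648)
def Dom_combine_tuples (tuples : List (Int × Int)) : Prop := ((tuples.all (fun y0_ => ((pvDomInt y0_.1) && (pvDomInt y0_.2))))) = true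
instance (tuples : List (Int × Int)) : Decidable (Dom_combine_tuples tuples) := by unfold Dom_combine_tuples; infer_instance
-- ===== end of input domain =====

-- B restructures A's in-place scan as a two-phase split-into-contiguous-runs-then-aggregate pass (objective: alternative decomposition, same cost).


-- ===== PORT A =====
-- A: single scan extending the last tuple of the accumulator in place.
def pvCombStep (combined : List (Int × Int)) (p : Int × Int) : List (Int × Int) :=
  match combined.getLast? with
  | some last =>
      if last.1 + last.2 == p.1 then
        combined.dropLast ++ [(last.1, last.2 + p.2)]
      else combined ++ [p]
  | none => combined ++ [p]

def combine_tuples (tuples : List (Int × Int)) : List (Int × Int) :=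
  tuples.foldl pvCombStep []

-- ===== PORT B =====
-- B: split into maximal contiguous runs (tracking prev_end), then aggregate each run.
def pvRunsStep (st : List (List (Int × Int)) × Option Int) (p : Int × Int) :
    List (List (Int × Int)) × Option Int :=
  if some p.1 == st.2 then
    (st.1.dropLast ++ [(st.1.getLast?.getD []) ++ [p]], some (p.1 + p.2))
  else
    (st.1 ++ [[p]], some (p.1 + p.2))

def pvMergeRun (run : List (Int × Int)) : Int × Int :=
  ((run.headD (0, 0)).1, run.foldl (fun a p => a + p.2) 0)

def combine_tuples_alt (tuples : List (Int × Int)) : List (Int × Int) :=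
  (tuples.foldl pvRunsStep ([], none)).1.map pvMergeRun

-- ===== PRECONDITION & SPEC =====
def Spec_combine_tuples (tuples : List (Int × Int)) (out : List (Int × Int)) : Prop := out = combine_tuples_alt tuples
instance (tuples : List (Int × Int)) (out : List (Int × Int)) : Decidable (Spec_combine_tuples tuples out) := by unfold Spec_combine_tuples; infer_instance

-- ===== CLAIM (what is proved, stated in full; the proofs are below) =====
def Claim_equal_combine_tuples : Prop := ∀ (tuples : List (Int × Int)), Dom_combine_tuples tuples → Spec_combine_tuples tuples (combine_tuples tuples)

-- ===== LEMMAS AND PROOFS =====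

-- Invariant linking A's accumulator to B's (runs, prev_end) state.
def pvInv (c : List (Int × Int)) (runs : List (List (Int × Int))) (pe : Option Int) : Prop :=
  c = runs.map pvMergeRun ∧ (∀ r ∈ runs, r ≠ []) ∧
  (match runs.getLast? with
   | none => pe = none
   | some r => pe = some ((pvMergeRun r).1 + (pvMergeRun r).2))

theorem pvMergeRun_concat (run : List (Int × Int)) (p : Int × Int) (h : run ≠ []) :
    pvMergeRun (run ++ [p]) = ((pvMergeRun run).1, (pvMergeRun run).2 + p.2) := by
  cases run with
  | nil => exact absurd rfl h
  | cons a t =>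
    simp [pvMergeRun, List.foldl_append]

theorem pvInv_step (c : List (Int × Int)) (runs : List (List (Int × Int)))
    (pe : Option Int) (p : Int × Int) (h : pvInv c runs pe) :
    pvInv (pvCombStep c p) (pvRunsStep (runs, pe) p).1 (pvRunsStep (runs, pe) p).2 := by
  obtain ⟨hc, hne, hpe⟩ := h
  by_cases hcond : (some p.1 == pe) = true
  · -- p continues the current run
    cases hlast : runs.getLast? with
    | none =>
      rw [hlast] at hpe
      simp [hpe] at hcond
    | some r =>
      rw [hlast] at hpe
      have hrne : r ≠ [] := hne r (List.mem_of_getLast? hlast)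
      have hruns : runs ≠ [] := by
        intro h0; rw [h0] at hlast; simp at hlast
      have hpeq : p.1 = (pvMergeRun r).1 + (pvMergeRun r).2 := by
        subst hpe; simpa using hcond
      have hclast : c.getLast? = some (pvMergeRun r) := by
        rw [hc, List.getLast?_map, hlast]; rfl
      constructor
      · -- value equality
        have hbeq : ((pvMergeRun r).1 + (pvMergeRun r).2 == p.1) = true := by
          simp [hpeq]
        have hstep : pvCombStep c p =
            c.dropLast ++ [((pvMergeRun r).1, (pvMergeRun r).2 + p.2)] := by
          rw [pvCombStep, hclast]
          simp [hbeq]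
        rw [hstep]
        simp only [pvRunsStep, hcond, if_pos, hlast]
        rw [List.map_append, hc, ← List.map_dropLast]
        congr 1
        simp [Option.getD, pvMergeRun_concat r p hrne]
      constructor
      · -- all runs nonempty
        simp only [pvRunsStep, hcond, if_pos]
        intro r2 hr2
        rcases List.mem_append.1 hr2 with h1 | h1
        · exact hne r2 (List.dropLast_subset _ h1)
        · simp at h1; subst h1; simp
      · -- prev_end
        simp only [pvRunsStep, hcond, if_pos]
        rw [List.getLast?_concat]
        rw [hlast]
        simp only [Option.getD]
        rw [pvMergeRun_concat r p hrne]
        simp [hpeq]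
        ring
  · -- p starts a new run
    have hc' : pvCombStep c p = c ++ [p] := by
      rw [pvCombStep]
      cases hlast : c.getLast? with
      | none => rfl
      | some last =>
        have : (last.1 + last.2 == p.1) = false := by
          rw [hc, List.getLast?_map] at hlast
          cases hrl : runs.getLast? with
          | none => rw [hrl] at hlast; simp at hlast
          | some r =>
            rw [hrl] at hlast
            rw [hrl] at hpe
            simp only [Option.map] at hlast
            cases hlast
            subst hpe
            simp only [beq_eq_false_iff_ne, ne_eq]
            intro heq
            apply hcond
            simp [heq]
        simp [this]
    refine ⟨?_, ?_, ?_⟩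
    · rw [hc']
      simp only [pvRunsStep]
      rw [if_neg hcond]
      rw [List.map_append, hc]
      simp [pvMergeRun]
    · simp only [pvRunsStep]
      rw [if_neg hcond]
      intro r2 hr2
      rcases List.mem_append.1 hr2 with h1 | h1
      · exact hne r2 h1
      · simp at h1; subst h1; simp
    · simp only [pvRunsStep]
      rw [if_neg hcond]
      rw [List.getLast?_concat]
      simp [pvMergeRun]

theorem pvInv_fold (ts : List (Int × Int)) :
    ∀ (c : List (Int × Int)) (runs : List (List (Int × Int))) (pe : Option Int),
    pvInv c runs pe →
    pvInv (ts.foldl pvCombStep c) (ts.foldl pvRunsStep (runs, pe)).1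
      (ts.foldl pvRunsStep (runs, pe)).2 := by
  induction ts with
  | nil => intro c runs pe h; exact h
  | cons p ts ih =>
    intro c runs pe h
    have h' := pvInv_step c runs pe p h
    simpa using ih _ _ _ h'

-- ===== VERDICT (by name: the statement is the Claim_ definition above) =====
theorem combine_tuples_spec : Claim_equal_combine_tuples := by
  intro tuples _
  have h0 : pvInv [] [] none := by
    refine ⟨rfl, by simp, rfl⟩
  have h := pvInv_fold tuples [] [] none h0
  exact h.1
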